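-- pv_equiv track=rewrite | github.com/Drahlous/wordle_helper | wordle_helper.py | build_prefix_tree
-- ===== SOURCE A (Python) =====
-- def build_prefix_tree(wordlist):
--     tree_list = [{} for _ in range(5)]
--     # Build the tree
--     for word in wordlist:
--         prev = None
--         for tree, char in zip(tree_list, word):
--
--             if prev is None:
--                 prev = 'Start'
--             tree.setdefault(char, {'parents': {}})
--             tree[char]["parents"].setdefault(prev, 0)
--             tree[char]["parents"][prev] += 1
--             prev = char
--     return tree_list
-- ===== SOURCE B (Python) =====
-- def build_prefix_tree(wordlist):
--     result = []
--     for p in range(5):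
--         pairs = [(w[p], 'Start' if p == 0 else w[p - 1]) for w in wordlist if len(w) > p]
--         chars = list(dict.fromkeys(c for c, _ in pairs))
--         tree = {}
--         for c in chars:
--             prevs = [prev for c2, prev in pairs if c2 == c]
--             tree[c] = {'parents': {prev: prevs.count(prev) for prev in dict.fromkeys(prevs)}}
--         result.append(tree)
--     return result
-- ===== Notes on version B (the rewrite author's own statement) =====
-- stated objective: alternative
-- what changed: A builds the five per-position dicts in one word-major pass, mutating counters via setdefault as it zips each word against the tree list; B instead computes, for each of the five positions independently, the (char, prev) pair list and builds each position's dict by dedup-then-count comprehensions (group-by instead of incremental mutation).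
import Mathlib
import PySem

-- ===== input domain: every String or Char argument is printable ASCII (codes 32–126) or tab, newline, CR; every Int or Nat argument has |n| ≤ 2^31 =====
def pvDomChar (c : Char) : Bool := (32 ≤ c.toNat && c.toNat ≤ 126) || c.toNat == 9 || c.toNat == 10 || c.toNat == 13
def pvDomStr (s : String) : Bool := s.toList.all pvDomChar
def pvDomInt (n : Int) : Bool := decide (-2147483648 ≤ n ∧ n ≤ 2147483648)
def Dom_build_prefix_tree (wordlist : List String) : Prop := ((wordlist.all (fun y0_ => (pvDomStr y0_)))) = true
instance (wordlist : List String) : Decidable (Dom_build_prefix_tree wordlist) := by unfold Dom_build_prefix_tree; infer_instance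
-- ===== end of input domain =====

-- B replaces A's single word-major mutating pass by five independent position-major
-- group-and-count comprehensions; same return value ('alternative', no speed claim).

-- ===== PORT A =====
abbrev PvTDict := PySem.Dict String (PySem.Dict String (PySem.Dict String Int))

-- A's inner loop body: tree.setdefault(char, {'parents': {}});
-- tree[char]["parents"].setdefault(prev, 0); tree[char]["parents"][prev] += 1
def pvUpd (t : PvTDict) (c prev : String) : PvTDict :=
  let t1 := t.setdefault c (PySem.Dict.ofList [("parents", PySem.Dict.empty)])
  let e := t1.getD c (PySem.Dict.ofList [("parents", PySem.Dict.empty)])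
  let pd := e.getD "parents" PySem.Dict.empty
  let pd1 := pd.setdefault prev 0
  let pd2 := pd1.insert prev (pd1.getD prev 0 + 1)
  t1.insert c (e.insert "parents" pd2)

-- 'for tree, char in zip(tree_list, word)': walk both lists together, threading prev
def pvStepWord : List PvTDict → List Char → String → List PvTDict
  | [], _, _ => []
  | ts, [], _ => ts
  | t :: ts, c :: cs, prev => pvUpd t (String.ofList [c]) prev :: pvStepWord ts cs (String.ofList [c])

-- a nested Dict rendered to the association-list output type
def pvRender (t : PvTDict) : List (String × List (String × List (String × Int))) :=
  t.items.map (fun ce => (ce.1, ce.2.items.map (fun kp => (kp.1, kp.2.items))))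

def build_prefix_tree (wordlist : List String) : List (List (String × List (String × List (String × Int)))) :=
  (wordlist.foldl (fun ts w => pvStepWord ts w.toList "Start") (List.replicate 5 PySem.Dict.empty)).map pvRender

-- ===== PORT B =====
def build_prefix_tree_alt (wordlist : List String) : List (List (String × List (String × List (String × Int)))) :=
  (List.range 5).map (fun p =>
    let pairs := (wordlist.filter (fun w => decide (p < w.toList.length))).map
      (fun w => (String.ofList [w.toList.getD p default],
                 if p = 0 then "Start" else String.ofList [w.toList.getD (p - 1) default]))
    let chars := PySem.List.dedup (pairs.map (·.1))
    chars.map (fun c =>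
      let prevs := (pairs.filter (fun q => q.1 == c)).map (·.2)
      (c, [("parents", (PySem.List.dedup prevs).map (fun pr => (pr, (prevs.count pr : Int))))])))

-- ===== PRECONDITION & SPEC =====
def Spec_build_prefix_tree (wordlist : List String) (out : List (List (String × List (String × List (String × Int))))) : Prop := out = build_prefix_tree_alt wordlist
instance (wordlist : List String) (out : List (List (String × List (String × List (String × Int))))) : Decidable (Spec_build_prefix_tree wordlist out) := by
  unfold Spec_build_prefix_tree
  haveI : DecidableEq (List (String × Int)) := inferInstance
  haveI : DecidableEq (List (String × List (String × Int))) := inferInstance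
  haveI : DecidableEq (List (String × List (String × List (String × Int)))) := inferInstance
  infer_instance

-- ===== CLAIM (what is proved, stated in full; the proofs are below) =====
def Claim_equal_build_prefix_tree : Prop := ∀ (wordlist : List String), Dom_build_prefix_tree wordlist → Spec_build_prefix_tree wordlist (build_prefix_tree wordlist)

-- ===== LEMMAS AND PROOFS =====

lemma pvItems_single {κ ν : Type} [BEq κ] (k : κ) (X : ν) :
    (PySem.Dict.ofList [(k, X)]).items = [(k, X)] := by
  simp [PySem.Dict.ofList, PySem.Dict.update, PySem.Dict.insert, PySem.Dict.empty,
    PySem.Dict.contains]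

lemma pvGetD_single {κ ν : Type} [BEq κ] [LawfulBEq κ] (k : κ) (X d0 : ν) :
    (PySem.Dict.ofList [(k, X)]).getD k d0 = X := by
  simp [PySem.Dict.getD, PySem.Dict.get?, pvItems_single]

lemma pvContains_single {κ ν : Type} [BEq κ] [LawfulBEq κ] (k : κ) (X : ν) :
    (PySem.Dict.ofList [(k, X)]).contains k = true := by
  simp [PySem.Dict.contains, pvItems_single]

lemma pvInsert_single {κ ν : Type} [BEq κ] [LawfulBEq κ] (k : κ) (X Y : ν) :
    (PySem.Dict.ofList [(k, X)]).insert k Y = PySem.Dict.ofList [(k, Y)] := by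
  apply PySem.Dict.ext
  rw [PySem.Dict.items_insert_of_contains _ _ (pvContains_single k X)]
  simp [pvItems_single]

-- the per-char entry the pair list (char, prev-char) at one position produces
def pvF (ps : List (String × String)) (c : String) : PySem.Dict String (PySem.Dict String Int) :=
  PySem.Dict.ofList [("parents", PySem.Dict.counter ((ps.filter (fun q => q.1 == c)).map (·.2)))]

-- the grouped ("B-shaped") dict a pair list produces
def pvGroup (ps : List (String × String)) : PvTDict :=
  PySem.Dict.mk ((PySem.List.dedup (ps.map (·.1))).map (fun c => (c, pvF ps c)))

lemma pvUpd_inner (pd : PySem.Dict String Int) (prev : String) :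
    (pd.setdefault prev 0).insert prev ((pd.setdefault prev 0).getD prev 0 + 1)
      = pd.insert prev (pd.getD prev 0 + 1) := by
  by_cases h : pd.contains prev
  · rw [PySem.Dict.setdefault_of_contains _ _ h]
  · rw [PySem.Dict.setdefault_of_not_contains _ _ (by simpa using h)]
    rw [PySem.Dict.getD_insert_self, PySem.Dict.insert_insert_self,
        PySem.Dict.getD_of_not_contains _ _ (by simpa using h)]

lemma pvOfList_append_singleton {α : Type} [BEq α] [LawfulBEq α] (xs : List α) (x : α) :
    PySem.Set.ofList (xs ++ [x]) =
      if x ∈ xs then PySem.Set.ofList xs else PySem.Set.ofList xs ++ [x] := by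
  have h1 : PySem.Set.ofList (xs ++ [x]) = PySem.Set.add (PySem.Set.ofList xs) x := by
    simp [PySem.Set.ofList, List.foldl_append]
  rw [h1, PySem.Set.add_eq_ite]
  simp [PySem.Set.mem_ofList]

lemma pvGroup_keys (ps : List (String × String)) :
    (pvGroup ps).keys = PySem.List.dedup (ps.map (·.1)) := by
  show List.map (fun x => x.1) (List.map (fun c => (c, pvF ps c)) (PySem.List.dedup (ps.map (·.1)))) = _
  rw [List.map_map]
  exact List.map_id _

lemma pvGroup_keys_nodup (ps : List (String × String)) : (pvGroup ps).keys.Nodup := by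
  rw [pvGroup_keys, PySem.List.dedup_eq_ofList]; exact PySem.Set.nodup_ofList _

lemma pvGroup_contains (ps : List (String × String)) (c : String) :
    (pvGroup ps).contains c = decide (c ∈ ps.map (·.1)) := by
  rw [PySem.Dict.contains_eq_decide_mem_keys, pvGroup_keys]
  simp

lemma pvF_append_self (ps : List (String × String)) (c prev : String) :
    pvF (ps ++ [(c, prev)]) c
      = PySem.Dict.ofList [("parents", PySem.Dict.counter (((ps.filter (fun q => q.1 == c)).map (·.2)) ++ [prev]))] := by
  simp [pvF]

lemma pvF_append_ne (ps : List (String × String)) (c prev c' : String) (h : c ≠ c') :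
    pvF (ps ++ [(c, prev)]) c' = pvF ps c' := by
  simp [pvF, List.filter_append, h]

lemma pvGroup_getD (ps : List (String × String)) (c : String) (hc : c ∈ ps.map (·.1)) (d0 : PySem.Dict String (PySem.Dict String Int)) :
    (pvGroup ps).getD c d0 = pvF ps c := by
  apply PySem.Dict.getD_of_mem_items _ _ (pvGroup_keys_nodup ps)
  show (c, pvF ps c) ∈ List.map _ _
  exact List.mem_map_of_mem ((PySem.List.mem_dedup _ _).mpr hc)

lemma pvUpd_eq_of_contains (t : PvTDict) (c prev : String) (h : t.contains c = true) :
    pvUpd t c prev = t.insert c ((t.getD c (PySem.Dict.ofList [("parents", PySem.Dict.empty)])).insert "parents"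
      (((t.getD c (PySem.Dict.ofList [("parents", PySem.Dict.empty)])).getD "parents" PySem.Dict.empty).insert prev
        (((t.getD c (PySem.Dict.ofList [("parents", PySem.Dict.empty)])).getD "parents" PySem.Dict.empty).getD prev 0 + 1))) := by
  show _ = _
  simp only [pvUpd]
  rw [PySem.Dict.setdefault_of_contains _ _ h, pvUpd_inner]

lemma pvUpd_eq_of_not_contains (t : PvTDict) (c prev : String) (h : t.contains c = false) :
    pvUpd t c prev = t.insert c (PySem.Dict.ofList [("parents", PySem.Dict.counter [prev])]) := by
  show _ = _
  simp only [pvUpd]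
  rw [PySem.Dict.setdefault_of_not_contains _ _ h, PySem.Dict.getD_insert_self, pvUpd_inner,
    pvGetD_single, PySem.Dict.insert_insert_self, pvInsert_single]
  rfl

lemma pvDedup_app (xs : List String) (x : String) :
    PySem.List.dedup (xs ++ [x]) =
      if x ∈ xs then PySem.List.dedup xs else PySem.List.dedup xs ++ [x] := by
  rw [PySem.List.dedup_eq_ofList, PySem.List.dedup_eq_ofList, pvOfList_append_singleton]

lemma pvUpd_group (ps : List (String × String)) (c prev : String) :
    pvUpd (pvGroup ps) c prev = pvGroup (ps ++ [(c, prev)]) := by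
  have hchars : (ps ++ [(c, prev)]).map (·.1) = ps.map (·.1) ++ [c] := by simp
  by_cases hc : c ∈ ps.map (·.1)
  · have hcon : (pvGroup ps).contains c = true := by
      rw [pvGroup_contains, decide_eq_true_iff]; exact hc
    rw [pvUpd_eq_of_contains _ _ _ hcon, pvGroup_getD _ _ hc]
    have h1 : (pvF ps c).getD "parents" PySem.Dict.empty
        = PySem.Dict.counter ((ps.filter (fun q => q.1 == c)).map (·.2)) := by
      rw [pvF]; exact pvGetD_single _ _ _
    rw [h1]
    have h2 : (PySem.Dict.counter ((ps.filter (fun q => q.1 == c)).map (·.2))).insert prev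
          ((PySem.Dict.counter ((ps.filter (fun q => q.1 == c)).map (·.2))).getD prev 0 + 1)
        = PySem.Dict.counter (((ps.filter (fun q => q.1 == c)).map (·.2)) ++ [prev]) := by
      rw [PySem.Dict.counter_append_singleton]; rfl
    rw [h2]
    have h3 : (pvF ps c).insert "parents"
          (PySem.Dict.counter (((ps.filter (fun q => q.1 == c)).map (·.2)) ++ [prev]))
        = pvF (ps ++ [(c, prev)]) c := by
      rw [pvF_append_self, pvF]; exact pvInsert_single _ _ _
    rw [h3]
    apply PySem.Dict.ext
    rw [PySem.Dict.items_insert_of_contains _ _ hcon]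
    show List.map _ (List.map (fun c' => (c', pvF ps c')) (PySem.List.dedup (ps.map (·.1))))
      = List.map (fun c' => (c', pvF (ps ++ [(c, prev)]) c')) (PySem.List.dedup ((ps ++ [(c, prev)]).map (·.1)))
    rw [hchars, pvDedup_app, if_pos hc, List.map_map]
    apply List.map_congr_left
    intro c' hc'
    by_cases hcc : c' = c
    · subst hcc; simp
    · have : (c' == c) = false := by simpa using hcc
      simp only [Function.comp_apply, this, if_neg, Bool.false_eq_true, not_false_iff]
      rw [pvF_append_ne _ _ _ _ (fun h => hcc h.symm)]
  · have hcon : (pvGroup ps).contains c = false := by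
      rw [pvGroup_contains, decide_eq_false_iff_not]; exact hc
    have hnil : ps.filter (fun q => q.1 == c) = [] := by
      rw [List.filter_eq_nil_iff]
      intro q hq hbeq
      exact hc (by rw [← (by simpa using hbeq : q.1 = c)]; exact List.mem_map_of_mem hq)
    have h3 : PySem.Dict.ofList [("parents", PySem.Dict.counter [prev])] = pvF (ps ++ [(c, prev)]) c := by
      rw [pvF_append_self, hnil]; rfl
    rw [pvUpd_eq_of_not_contains _ _ _ hcon, h3]
    apply PySem.Dict.ext
    rw [PySem.Dict.items_insert_of_not_contains _ _ hcon]
    show List.map (fun c' => (c', pvF ps c')) (PySem.List.dedup (ps.map (·.1))) ++ _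
      = List.map (fun c' => (c', pvF (ps ++ [(c, prev)]) c')) (PySem.List.dedup ((ps ++ [(c, prev)]).map (·.1)))
    rw [hchars, pvDedup_app, if_neg hc, List.map_append]
    congr 1
    apply List.map_congr_left
    intro c' hc'
    have hcc : c ≠ c' := fun h => hc (h ▸ (PySem.List.mem_dedup _ _).mp hc')
    rw [pvF_append_ne _ _ _ _ hcc]

lemma pvFold_group (ps : List (String × String)) :
    ps.foldl (fun t q => pvUpd t q.1 q.2) PySem.Dict.empty = pvGroup ps := by
  induction ps using List.reverseRecOn with
  | nil => rfl
  | append_singleton ps q ih =>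
    rw [List.foldl_append, List.foldl_cons, List.foldl_nil, ih, pvUpd_group]

-- the per-position update A performs on one tree, extracted
def pvStepPos (p : Nat) (t : PvTDict) (w : String) : PvTDict :=
  if p < w.toList.length then
    pvUpd t (String.ofList [w.toList.getD p default])
      (if p = 0 then "Start" else String.ofList [w.toList.getD (p - 1) default])
  else t

lemma pvStepWord_getElem? (ts : List PvTDict) (cs : List Char) (prev : String) (p : Nat) :
    (pvStepWord ts cs prev)[p]? =
      if p < cs.length then
        (ts[p]?).map (fun t => pvUpd t (String.ofList [cs.getD p default])
          (if p = 0 then prev else String.ofList [cs.getD (p - 1) default]))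
      else ts[p]? := by
  induction ts generalizing cs prev p with
  | nil => simp [pvStepWord]
  | cons t ts ih =>
    cases cs with
    | nil => simp [pvStepWord]
    | cons c cs =>
      cases p with
      | zero => simp [pvStepWord]
      | succ p =>
        show (pvStepWord ts cs (String.ofList [c]))[p]? = _
        rw [ih]
        by_cases h : p < cs.length
        · cases p <;> simp [h]
        · cases p <;> simp [h]

lemma pvFoldWords_getElem? (ws : List String) (ts : List PvTDict) (p : Nat) :
    (ws.foldl (fun ts w => pvStepWord ts w.toList "Start") ts)[p]? =
      (ts[p]?).map (fun t => ws.foldl (pvStepPos p) t) := by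
  induction ws generalizing ts with
  | nil => simp
  | cons w ws ih =>
    rw [List.foldl_cons, ih, pvStepWord_getElem?]
    simp only [List.foldl_cons]
    by_cases h : p < w.toList.length
    · rw [if_pos h, Option.map_map]
      apply congrFun
      apply congrArg
      funext t
      simp only [Function.comp_apply, pvStepPos, if_pos h]
    · rw [if_neg h]
      apply congrFun
      apply congrArg
      funext t
      simp only [pvStepPos, if_neg h]

-- the (char, prev) pair list B forms at position p
def pvPairs (wordlist : List String) (p : Nat) : List (String × String) :=
  (wordlist.filter (fun w => decide (p < w.toList.length))).map
    (fun w => (String.ofList [w.toList.getD p default],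
               if p = 0 then "Start" else String.ofList [w.toList.getD (p - 1) default]))

lemma pvFold_pos_eq_pairs (wordlist : List String) (p : Nat) :
    wordlist.foldl (pvStepPos p) PySem.Dict.empty
      = (pvPairs wordlist p).foldl (fun t q => pvUpd t q.1 q.2) PySem.Dict.empty := by
  rw [pvPairs, List.foldl_map, List.foldl_filter]
  apply List.foldl_ext
  intro t w _
  by_cases h : p < w.toList.length
  · rw [pvStepPos, if_pos h, if_pos (show decide (p < w.toList.length) = true from by simpa using h)]
  · rw [pvStepPos, if_neg h, if_neg (show ¬ decide (p < w.toList.length) = true from by simpa using h)]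

lemma pvRender_group (ps : List (String × String)) :
    pvRender (pvGroup ps) =
      (PySem.List.dedup (ps.map (·.1))).map (fun c =>
        let prevs := (ps.filter (fun q => q.1 == c)).map (·.2)
        (c, [("parents", (PySem.List.dedup prevs).map (fun pr => (pr, (prevs.count pr : Int))))])) := by
  show List.map _ (List.map (fun c => (c, pvF ps c)) (PySem.List.dedup (ps.map (·.1)))) = _
  rw [List.map_map]
  apply List.map_congr_left
  intro c _
  show (c, ((pvF ps c).items.map (fun kp => (kp.1, kp.2.items)))) = _
  rw [pvF, pvItems_single]
  simp only [List.map_cons, List.map_nil, PySem.Dict.items_counter, PySem.List.dedup_eq_ofList]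

-- ===== VERDICT (by name: the statement is the Claim_ definition above) =====
theorem build_prefix_tree_spec : Claim_equal_build_prefix_tree := by
  intro wordlist _
  show build_prefix_tree wordlist = build_prefix_tree_alt wordlist
  apply List.ext_getElem?
  intro p
  rw [build_prefix_tree, build_prefix_tree_alt, List.getElem?_map, List.getElem?_map,
    pvFoldWords_getElem?]
  by_cases h : p < 5
  · rw [List.getElem?_replicate, if_pos h, List.getElem?_range h]
    simp only [Option.map_some]
    congr 1
    rw [pvFold_pos_eq_pairs, pvFold_group, pvRender_group]
    rfl
  · rw [List.getElem?_replicate, if_neg h,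
      List.getElem?_eq_none (by simpa using by omega : (List.range 5).length ≤ p)]
    rfl
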